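-- pv_equiv track=rewrite | github.com/VirtuaIL/15-puzzle-solver | main.py | generate_solved_board
-- ===== SOURCE A (Python) =====
-- def generate_solved_board(w, k):
--     solved = []
--     value = 1
--     for i in range(k):
--         row = []
--         for j in range(w):
--             if value < w * k:
--                 row.append(value)
--                 value += 1
--             else:
--                 row.append(0)  # puste pole na ostatnim
--         solved.append(row)
--     return solved
-- ===== SOURCE B (Python) =====
-- def generate_solved_board(w, k):
--     if k <= 0:
--         return []
--     n = w * k
--     vals = (list(range(1, n)) + [0]) if n > 0 else []
--     return [vals[i * w:(i + 1) * w] for i in range(k)]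
-- ===== Notes on version B (the rewrite author's own statement) =====
-- stated objective: simpler
-- what changed: Replaces A's nested counting loops with a guarded value-counter by building the flat value list range(1, w*k)+[0] once and reshaping it into k rows with slices of width w.
import Mathlib
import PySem

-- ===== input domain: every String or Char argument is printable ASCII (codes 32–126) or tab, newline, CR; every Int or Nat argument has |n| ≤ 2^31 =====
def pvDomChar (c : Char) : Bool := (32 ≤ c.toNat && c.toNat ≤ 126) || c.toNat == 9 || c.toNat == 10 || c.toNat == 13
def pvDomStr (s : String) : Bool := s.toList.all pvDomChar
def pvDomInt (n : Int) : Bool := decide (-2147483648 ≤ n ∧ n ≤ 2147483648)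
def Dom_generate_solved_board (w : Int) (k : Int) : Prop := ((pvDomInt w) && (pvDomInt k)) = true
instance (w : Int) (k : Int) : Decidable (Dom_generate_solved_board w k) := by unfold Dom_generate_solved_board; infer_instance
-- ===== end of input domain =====

-- B builds the flat value list once and reshapes it into rows by slicing, instead of A's
-- nested counting loops; objective: simpler (same O(w*k) cost, return value proved equal).

-- ===== PORT A =====
-- range(k)/range(w) are ported as List.range (·).toNat with Int elements
-- (= PySem.List.pyRange 0 · 1 by PySem.List.pyRange_zero_natCast; pyRange itself is too slow to #eval)
def generate_solved_board (w : Int) (k : Int) : List (List Int) :=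
  (((List.range k.toNat).map (fun (i : Nat) => (i : Int))).foldl
    (fun (st : List (List Int) × Int) _ =>
      let inner := ((List.range w.toNat).map (fun (j : Nat) => (j : Int))).foldl
        (fun (st2 : List Int × Int) _ =>
          if st2.2 < w * k then (st2.1 ++ [st2.2], st2.2 + 1) else (st2.1 ++ [(0:Int)], st2.2))
        ([], st.2)
      (st.1 ++ [inner.1], inner.2))
    ([], 1)).1

-- ===== PORT B =====
def generate_solved_board_alt (w : Int) (k : Int) : List (List Int) :=
  if k ≤ 0 then []
  else
    let n := w * k
    -- list(range(1, n)) ported as the corresponding Lean range (= PySem.List.pyRange 1 n 1 by PySem.List.pyRange_one)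
    let vals : List Int := if n > 0 then (List.range (n - 1).toNat).map (fun (j : Nat) => 1 + (j : Int)) ++ [0] else []
    ((List.range k.toNat).map (fun (i : Nat) => (i : Int))).map
      (fun i => PySem.List.slice vals (some (i * w)) (some ((i + 1) * w)))

-- ===== PRECONDITION & SPEC =====
def Spec_generate_solved_board (w : Int) (k : Int) (out : List (List Int)) : Prop := out = generate_solved_board_alt w k
instance (w : Int) (k : Int) (out : List (List Int)) : Decidable (Spec_generate_solved_board w k out) := by unfold Spec_generate_solved_board; infer_instance

-- ===== CLAIM (what is proved, stated in full; the proofs are below) =====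
def Claim_equal_generate_solved_board : Prop := ∀ (w : Int) (k : Int), Dom_generate_solved_board w k → Spec_generate_solved_board w k (generate_solved_board w k)

-- ===== LEMMAS AND PROOFS =====

-- the inner loop body of A, as a named step function
def pvInner (w k : Int) : List Int × Int → List Int × Int :=
  fun st2 => if st2.2 < w * k then (st2.1 ++ [st2.2], st2.2 + 1) else (st2.1 ++ [(0:Int)], st2.2)

-- the outer loop body of A
def pvOuter (w k : Int) : List (List Int) × Int → List (List Int) × Int :=
  fun st =>
    let inner := ((List.range w.toNat).map (fun (j : Nat) => (j : Int))).foldl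
      (fun st2 _ => pvInner w k st2) ([], st.2)
    (st.1 ++ [inner.1], inner.2)

-- row i of the intended board (0-indexed), for w > 0, k > 0
def pvRowOf (w k : Int) (i : Nat) : List Int :=
  if (i : Int) < k - 1 then PySem.List.pyRange ((i:Int)*w+1) ((i:Int)*w+w+1) 1
  else PySem.List.pyRange ((i:Int)*w+1) (w*k) 1 ++ [0]

-- a fold whose body ignores the list element is an iterate
theorem pv_foldl_const {α β : Type} (l : List β) (g : α → α) (x : α) :
    l.foldl (fun s _ => g s) x = g^[l.length] x := by
  induction l generalizing x with
  | nil => rfl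
  | cons y ys ih => simpa [Function.iterate_succ_apply] using ih (g x)

theorem pvA_as_iterate (w k : Int) :
    generate_solved_board w k = ((pvOuter w k)^[k.toNat] ([], 1)).1 := by
  rw [generate_solved_board, pv_foldl_const]
  simp only [List.length_map, List.length_range]
  rfl

theorem pvInner_all_fire (w k : Int) (m : Nat) : ∀ (row : List Int) (v : Int),
    v + m ≤ w * k →
    (pvInner w k)^[m] (row, v) = (row ++ PySem.List.pyRange v (v + m) 1, v + m) := by
  induction m with
  | zero => intro row v _; simp [PySem.List.pyRange_one_eq_nil]
  | succ t ih =>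
    intro row v h
    have h' : v + (t : Int) + 1 ≤ w * k := by push_cast at h; omega
    have hv : v < w * k := by omega
    rw [Function.iterate_succ_apply]
    have hstep : pvInner w k (row, v) = (row ++ [v], v + 1) := by
      simp [pvInner, hv]
    rw [hstep, ih (row ++ [v]) (v + 1) (by omega)]
    have hr : PySem.List.pyRange v (v + ((t : Int) + 1)) 1
        = v :: PySem.List.pyRange (v + 1) (v + ((t : Int) + 1)) 1 :=
      PySem.List.pyRange_one_cons (by omega)
    have hb : v + 1 + (t : Int) = v + ((t : Int) + 1) := by ring
    push_cast
    rw [hb, hr]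
    simp

theorem pvInner_last (w k : Int) (m : Nat) (row : List Int) (v : Int)
    (hm : 0 < m) (h : v + m = w * k + 1) :
    (pvInner w k)^[m] (row, v) = (row ++ PySem.List.pyRange v (w * k) 1 ++ [0], w * k) := by
  obtain ⟨t, rfl⟩ : ∃ t, m = t + 1 := ⟨m - 1, by omega⟩
  rw [Function.iterate_succ_apply']
  rw [pvInner_all_fire w k t row v (by push_cast at h ⊢; omega)]
  have hv : v + (t:Int) = w * k := by push_cast at h ⊢; omega
  simp [pvInner, hv]

theorem pvOuter_invariant (w k : Int) (hw : 0 < w) (hk : 0 < k) :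
    ∀ (j : Nat), (j : Int) ≤ k →
    (pvOuter w k)^[j] ([], 1) =
      ((List.range j).map (pvRowOf w k), if (j : Int) < k then (j:Int) * w + 1 else w * k) := by
  have hwW : ((w.toNat : Int)) = w := Int.toNat_of_nonneg hw.le
  intro j
  induction j with
  | zero => intro _; simp [hk]
  | succ t ih =>
    intro hj
    have ht : (t : Int) < k := by push_cast at hj; omega
    rw [Function.iterate_succ_apply', ih (by omega)]
    rw [pvOuter]
    simp only [if_pos ht]
    rw [pv_foldl_const]
    simp only [List.length_map, List.length_range]
    by_cases hlast : (t : Int) < k - 1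
    · -- not the last row: every cell gets a value
      rw [pvInner_all_fire w k w.toNat [] ((t:Int) * w + 1)
        (by rw [hwW]; nlinarith)]
      rw [List.range_succ, List.map_append]
      simp only [Prod.mk.injEq, List.map_cons, List.map_nil, List.nil_append]
      refine ⟨?_, ?_⟩
      · congr 1
        rw [pvRowOf, if_pos hlast]
        have harg : (t:Int) * w + 1 + (w.toNat : Int) = (t:Int) * w + w + 1 := by
          rw [hwW]; ring
        rw [harg]
      · rw [if_pos (show ((t+1 : Nat) : Int) < k by push_cast; omega)]
        rw [hwW]; push_cast; ring
    · -- last row: t = k - 1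
      have htk : (t : Int) = k - 1 := by omega
      rw [pvInner_last w k w.toNat [] ((t:Int) * w + 1) (by omega)
        (by rw [hwW, htk]; ring)]
      rw [List.range_succ, List.map_append]
      simp only [Prod.mk.injEq, List.map_cons, List.map_nil, List.nil_append]
      refine ⟨?_, ?_⟩
      · congr 1
        rw [pvRowOf, if_neg hlast]
      · rw [if_neg (show ¬ ((t+1 : Nat) : Int) < k by push_cast; omega)]

theorem pv_slice_nil {α : Type} (a b : Option Int) :
    PySem.List.slice ([] : List α) a b = [] := by
  cases a <;> cases b <;> simp [PySem.List.slice]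

theorem pvB_rows (w k : Int) (hw : 0 < w) (hk : 0 < k) :
    generate_solved_board_alt w k = (List.range k.toNat).map (pvRowOf w k) := by
  have hwW : ((w.toNat : Int)) = w := Int.toNat_of_nonneg hw.le
  have hkK : ((k.toNat : Int)) = k := Int.toNat_of_nonneg hk.le
  have hn : 0 < w * k := mul_pos hw hk
  rw [generate_solved_board_alt, if_neg (not_le.mpr hk)]
  simp only [if_pos hn]
  rw [← PySem.List.pyRange_one 1 (w * k)]
  rw [List.map_map]
  apply List.map_congr_left
  intro t hmem
  have htK : t < k.toNat := List.mem_range.mp hmem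
  have htk : (t : Int) < k := by omega
  simp only [Function.comp_apply]
  -- slice bounds as naturals
  have ha : ((t : Int) * w) = ((t * w.toNat : Nat) : Int) := by push_cast [hwW]; ring
  have hb : (((t : Int) + 1) * w) = (((t + 1) * w.toNat : Nat) : Int) := by push_cast [hwW]; ring
  rw [ha, hb, PySem.List.slice_natCast]
  have hsub : (t + 1) * w.toNat - t * w.toNat = w.toNat := by ring_nf; omega
  rw [hsub]
  -- split off the first t*w values
  have hsplit1 : PySem.List.pyRange 1 (w * k) 1 =
      PySem.List.pyRange 1 ((t:Int) * w + 1) 1 ++ PySem.List.pyRange ((t:Int) * w + 1) (w * k) 1 := by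
    apply PySem.List.pyRange_one_append
    · nlinarith
    · nlinarith
  have hlen1 : (PySem.List.pyRange 1 ((t:Int) * w + 1) 1).length = t * w.toNat := by
    rw [PySem.List.length_pyRange_one]
    have : (t:Int) * w + 1 - 1 = ((t * w.toNat : Nat) : Int) := by push_cast [hwW]; ring
    rw [this]; omega
  rw [hsplit1, List.append_assoc, ← hlen1, List.drop_left]
  by_cases hlast : (t : Int) < k - 1
  · -- interior row
    have hsplit2 : PySem.List.pyRange ((t:Int) * w + 1) (w * k) 1 =
        PySem.List.pyRange ((t:Int) * w + 1) ((t:Int) * w + w + 1) 1 ++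
        PySem.List.pyRange ((t:Int) * w + w + 1) (w * k) 1 := by
      apply PySem.List.pyRange_one_append
      · omega
      · nlinarith
    have hlen2 : (PySem.List.pyRange ((t:Int) * w + 1) ((t:Int) * w + w + 1) 1).length = w.toNat := by
      rw [PySem.List.length_pyRange_one]; omega
    rw [hsplit2, List.append_assoc, ← hlen2, List.take_left]
    rw [pvRowOf, if_pos hlast]
  · -- last row
    have hlen3 : (PySem.List.pyRange ((t:Int) * w + 1) (w * k) 1 ++ [(0:Int)]).length = w.toNat := by
      have htk1 : (t : Int) = k - 1 := by omega
      rw [List.length_append, PySem.List.length_pyRange_one]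
      simp only [List.length_cons, List.length_nil]
      have : w * k - ((t:Int) * w + 1) = w - 1 := by rw [htk1]; ring
      rw [this]; omega
    rw [List.take_of_length_le (by rw [hlen3])]
    rw [pvRowOf, if_neg hlast]

theorem pvOuter_degenerate (w k : Int) (hw : w ≤ 0) :
    ∀ (j : Nat), (pvOuter w k)^[j] ([], 1) = (List.replicate j [], 1) := by
  intro j
  induction j with
  | zero => rfl
  | succ t ih =>
    rw [Function.iterate_succ_apply', ih, pvOuter]
    have hw0 : w.toNat = 0 := by omega
    rw [hw0]
    simp [List.replicate_succ']

-- ===== VERDICT (by name: the statement is the Claim_ definition above) =====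
theorem generate_solved_board_spec : Claim_equal_generate_solved_board := by
  intro w k _
  unfold Spec_generate_solved_board
  by_cases hk : 0 < k
  · by_cases hw : 0 < w
    · -- main case
      rw [pvA_as_iterate, pvOuter_invariant w k hw hk k.toNat (by omega)]
      rw [pvB_rows w k hw hk]
    · -- w ≤ 0 < k : k empty rows
      rw [pvA_as_iterate, pvOuter_degenerate w k (by omega)]
      rw [generate_solved_board_alt, if_neg (not_le.mpr hk)]
      have hn : ¬ (w * k > 0) :=
        not_lt.mpr (mul_nonpos_of_nonpos_of_nonneg (by omega) hk.le)
      simp only [if_neg hn]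
      have hsl : ∀ i ∈ (List.range k.toNat).map (fun (i : Nat) => (i : Int)),
          PySem.List.slice ([] : List Int) (some (i * w)) (some ((i + 1) * w)) = [] := by
        intro i _; exact pv_slice_nil _ _
      rw [List.map_congr_left hsl]
      rw [List.map_const']
      simp
  · -- k ≤ 0: both empty
    have hk0 : k.toNat = 0 := by omega
    rw [pvA_as_iterate, hk0, generate_solved_board_alt, if_pos (by omega : k ≤ 0)]
    rfl
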